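-- pv_equiv track=rewrite | github.com/Predelnik/Scripture | extract.py | strip_comment_line
-- ===== SOURCE A (Python) =====
-- def strip_comment_line(line):
-- 	i = 0
-- 	while i < len (line) and line[i] != '/':
-- 		i += 1
-- 	while i < len (line) and line[i] == '/':
-- 		i += 1
-- 	if i < len (line) and line[i] == ' ':
-- 		i += 1
-- 	if i < len (line) and line[i] == '<':
-- 		i += 1
-- 	return line[i:]
-- ===== SOURCE B (Python) =====
-- def strip_comment_line(line):
--     # One-pass finite-state machine: states 0 = before first '/',
--     # 1 = inside slash run, 2 = after optional space, 4 = copying the tail.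
--     state = 0
--     out = []
--     for c in line:
--         if state == 4:
--             out.append(c)
--         elif state == 0:
--             if c == '/':
--                 state = 1
--         elif state == 1:
--             if c == '/':
--                 pass
--             elif c == ' ':
--                 state = 2
--             elif c == '<':
--                 state = 4
--             else:
--                 out.append(c)
--                 state = 4
--         else:  # state == 2
--             if c == '<':
--                 state = 4
--             else:
--                 out.append(c)
--                 state = 4
--     return ''.join(out)
-- ===== Notes on version B (the rewrite author's own statement) =====
-- stated objective: alternative
-- what changed: Replaces A's four staged index scans over the line with a single-pass explicit finite-state machine (states: before-slash, slash-run, optional-space, copy) that builds the output with an accumulator in one traversal.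
import Mathlib
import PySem

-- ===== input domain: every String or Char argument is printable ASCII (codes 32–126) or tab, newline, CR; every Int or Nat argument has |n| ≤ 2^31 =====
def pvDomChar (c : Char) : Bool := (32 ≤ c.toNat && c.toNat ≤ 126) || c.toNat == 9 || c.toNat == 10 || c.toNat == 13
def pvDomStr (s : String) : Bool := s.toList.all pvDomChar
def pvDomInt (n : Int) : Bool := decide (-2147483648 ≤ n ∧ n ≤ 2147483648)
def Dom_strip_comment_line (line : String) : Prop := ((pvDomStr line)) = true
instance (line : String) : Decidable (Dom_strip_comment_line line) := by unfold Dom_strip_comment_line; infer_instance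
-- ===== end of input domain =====

-- B replaces A's four staged index scans with a one-pass finite-state machine; objective: alternative.

-- ===== PORT A =====
-- A's first while: advance past characters that are not '/'
def pvSkipToSlash : List Char → List Char
  | [] => []
  | c :: cs => if c ≠ '/' then pvSkipToSlash cs else c :: cs

-- A's second while: advance past the run of '/'
def pvSkipSlashes : List Char → List Char
  | [] => []
  | c :: cs => if c = '/' then pvSkipSlashes cs else c :: cs

-- the two 'if' steps of A: drop one leading ' ', then one leading '<'
def pvDropSpace : List Char → List Char
  | ' ' :: cs => cs
  | l => l

def pvDropLt : List Char → List Char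
  | '<' :: cs => cs
  | l => l

def strip_comment_line (line : String) : String :=
  String.ofList (pvDropLt (pvDropSpace (pvSkipSlashes (pvSkipToSlash line.toList))))

-- ===== PORT B =====
-- one transition of B's state machine: (state, accumulated output) acted on by a character
def pvStep : Nat × List Char → Char → Nat × List Char
  | (4, out), c => (4, out ++ [c])
  | (0, out), c => if c = '/' then (1, out) else (0, out)
  | (1, out), c =>
      if c = '/' then (1, out)
      else if c = ' ' then (2, out)
      else if c = '<' then (4, out)
      else (4, out ++ [c])
  | (2, out), c => if c = '<' then (4, out) else (4, out ++ [c])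
  | s, _ => s

def strip_comment_line_alt (line : String) : String :=
  String.ofList (line.toList.foldl pvStep (0, [])).2

-- ===== PRECONDITION & SPEC =====
def Spec_strip_comment_line (line : String) (out : String) : Prop := out = strip_comment_line_alt line
instance (line : String) (out : String) : Decidable (Spec_strip_comment_line line out) := by unfold Spec_strip_comment_line; infer_instance

-- ===== CLAIM (what is proved, stated in full; the proofs are below) =====
def Claim_equal_strip_comment_line : Prop := ∀ (line : String), Dom_strip_comment_line line → Spec_strip_comment_line line (strip_comment_line line)

-- ===== LEMMAS AND PROOFS =====
theorem pvFold4 (l out : List Char) : l.foldl pvStep (4, out) = (4, out ++ l) := by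
  induction l generalizing out with
  | nil => simp
  | cons c cs ih => simp [List.foldl, pvStep, ih]

theorem pvDropSpace_ne {c : Char} (cs : List Char) (h : c ≠ ' ') :
    pvDropSpace (c :: cs) = c :: cs := by
  unfold pvDropSpace
  split
  · simp_all
  · rfl

theorem pvDropLt_ne {c : Char} (cs : List Char) (h : c ≠ '<') :
    pvDropLt (c :: cs) = c :: cs := by
  unfold pvDropLt
  split
  · simp_all
  · rfl

theorem pvFold2 (l out : List Char) : (l.foldl pvStep (2, out)).2 = out ++ pvDropLt l := by
  cases l with
  | nil => simp [pvDropLt]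
  | cons c cs =>
    by_cases h : c = '<'
    · subst h; simp [List.foldl, pvStep, pvFold4, pvDropLt]
    · simp [List.foldl, pvStep, h, pvFold4, pvDropLt_ne cs h]

theorem pvFold1 (l out : List Char) :
    (l.foldl pvStep (1, out)).2 = out ++ pvDropLt (pvDropSpace (pvSkipSlashes l)) := by
  induction l generalizing out with
  | nil => simp [pvSkipSlashes, pvDropSpace, pvDropLt]
  | cons c cs ih =>
    by_cases hs : c = '/'
    · subst hs; simpa [List.foldl, pvStep, pvSkipSlashes] using ih out
    · by_cases hsp : c = ' '
      · subst hsp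
        simp [List.foldl, pvStep, pvFold2, pvSkipSlashes, pvDropSpace]
      · by_cases hlt : c = '<'
        · subst hlt
          simp [List.foldl, pvStep, pvFold4, pvSkipSlashes, pvDropSpace, pvDropLt]
        · simp [List.foldl, pvStep, hs, hsp, hlt, pvFold4, pvSkipSlashes,
            pvDropSpace_ne cs hsp, pvDropLt_ne cs hlt]

theorem pvFold0 (l out : List Char) :
    (l.foldl pvStep (0, out)).2 = out ++ pvDropLt (pvDropSpace (pvSkipSlashes (pvSkipToSlash l))) := by
  induction l generalizing out with
  | nil => simp [pvSkipToSlash, pvSkipSlashes, pvDropSpace, pvDropLt]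
  | cons c cs ih =>
    by_cases hs : c = '/'
    · subst hs
      simp [List.foldl, pvStep, pvFold1, pvSkipToSlash, pvSkipSlashes]
    · simpa [List.foldl, pvStep, hs, pvSkipToSlash] using ih out

theorem strip_comment_line_spec : Claim_equal_strip_comment_line := by
  intro line _
  unfold Spec_strip_comment_line strip_comment_line strip_comment_line_alt
  rw [pvFold0]
  simp
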